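-- pv_equiv track=rewrite | github.com/ssoso27/Smoothie2 | pythAlgo/line/2020/05.py | solution
-- ===== SOURCE A (Python) =====
-- def solution(dataSource, tags):
--     result = set()
--
--     # 태그 별로 분류하기
--     tags_in_docs = {}
--     for ds in dataSource:
--         doc = ds.pop(0)
--         for tag in ds:
--             if tag not in tags_in_docs.keys():
--                 tags_in_docs[tag] = []
--             tags_in_docs[tag].append(doc)
--
--     # 검색
--     have_tags_cnt = {}
--     for tag in tags:
--         # result = result.union(set(tags_in_docs[tag]))
--         for doc in tags_in_docs[tag]:
--             if doc not in have_tags_cnt.keys():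
--                 have_tags_cnt[doc] = 10**5
--             result.add(doc)
--             have_tags_cnt[doc] -= 1
--
--     answer = sorted(sorted(result), key=lambda x: have_tags_cnt[x])[:10]
--     return answer
-- ===== SOURCE B (Python) =====
-- def solution(dataSource, tags):
--     # multiplicity of each searched tag
--     searched = {}
--     for t in tags:
--         searched[t] = searched.get(t, 0) + 1
--
--     # tag -> {doc: occurrences} counter index
--     hits = {}
--     for ds in dataSource:
--         doc = ds.pop(0)
--         for tag in ds:
--             cnt = hits.setdefault(tag, {})
--             cnt[doc] = cnt.get(doc, 0) + 1
--
--     # score each document once per (distinct tag, doc) pair, weighted by multiplicity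
--     score = {}
--     for t in searched:
--         for doc, c in hits[t].items():
--             score[doc] = score.get(doc, 0) + searched[t] * c
--
--     return sorted(sorted(score), key=lambda d: -score[d])[:10]
-- ===== Notes on version B (the rewrite author's own statement) =====
-- stated objective: faster
-- what changed: Replaces A's duplicate-carrying tag->documents lists, result set and 10**5-minus-hits counter dict with a multiplicity counter of the searched tags, a tag->(doc->occurrence-count) index and weighted per-document scores, so duplicate searched tags and repeated occurrences are handled once instead of once per occurrence.
import Mathlib
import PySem

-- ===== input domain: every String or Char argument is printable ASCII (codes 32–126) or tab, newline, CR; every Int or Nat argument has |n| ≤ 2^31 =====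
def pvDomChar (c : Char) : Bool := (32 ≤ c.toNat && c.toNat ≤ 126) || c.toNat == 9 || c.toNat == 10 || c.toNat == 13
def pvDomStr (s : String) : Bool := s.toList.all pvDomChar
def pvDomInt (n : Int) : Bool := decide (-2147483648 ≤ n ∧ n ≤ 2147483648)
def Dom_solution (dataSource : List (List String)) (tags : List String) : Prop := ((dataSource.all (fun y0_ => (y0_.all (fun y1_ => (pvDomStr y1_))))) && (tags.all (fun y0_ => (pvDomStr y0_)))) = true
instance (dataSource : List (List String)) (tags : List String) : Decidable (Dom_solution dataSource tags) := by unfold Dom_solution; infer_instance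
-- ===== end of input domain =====

-- B replaces A's duplicate-carrying tag→documents lists, result set and 10^5-minus-hits
-- counters with a searched-tag multiplicity counter, a tag→(doc→occurrences) counter index
-- and weighted per-document scores; both A and B pop each row's head in place, the
-- equivalence proved is about the return value (the mutation is identical in A and B).

-- ===== PORT A =====
-- first loop body: doc = ds.pop(0); for tag in ds: ensure the key exists, append doc
def rowIndexA (d : PySem.Dict String (List String)) (ds : List String) :
    PySem.Dict String (List String) :=
  match ds with
  | [] => d  -- ds.pop(0) raises IndexError in Python here; excluded by Pre_solution
  | doc :: rest =>
      rest.foldl (fun d tag =>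
        let d' := if d.contains tag = true then d else d.insert tag []
        d'.modify tag [] (· ++ [doc])) d

-- search-loop body for one doc: have_tags_cnt default, result.add(doc), decrement
def stepA (st : PySem.Set String × PySem.Dict String Int) (doc : String) :
    PySem.Set String × PySem.Dict String Int :=
  let cnt := if st.2.contains doc = true then st.2 else st.2.insert doc (10 ^ 5)
  (st.1.add doc, cnt.modify doc 0 (· - 1))

def solution (dataSource : List (List String)) (tags : List String) : List String :=
  let tagsInDocs := dataSource.foldl rowIndexA PySem.Dict.empty
  -- tags_in_docs[tag] raises KeyError when tag is absent; excluded by Pre_solution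
  let st := tags.foldl (fun st tag => (tagsInDocs.getD tag []).foldl stepA st)
      (PySem.Set.empty, PySem.Dict.empty)
  -- the sort key have_tags_cnt[x] is defined for every x in result under Pre_solution
  (PySem.List.sorted (PySem.List.sorted st.1 (fun x => x) false)
      (fun x => st.2.getD x 0) false).take 10

-- ===== PORT B =====
-- searched = multiplicity counter of the searched tags
def searchedB (tags : List String) : PySem.Dict String Int :=
  tags.foldl (fun d t => d.insert t (d.getD t 0 + 1)) PySem.Dict.empty

-- second loop body: doc = ds.pop(0); for tag in ds: cnt = hits.setdefault(tag, {});
-- cnt[doc] = cnt.get(doc, 0) + 1  (the alias write-back is the modify at the same key)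
def hitsRow (h : PySem.Dict String (PySem.Dict String Int)) (ds : List String) :
    PySem.Dict String (PySem.Dict String Int) :=
  match ds with
  | [] => h  -- ds.pop(0) raises IndexError in Python here; excluded by Pre_solution
  | doc :: rest =>
      rest.foldl (fun h tag =>
        (h.setdefault tag PySem.Dict.empty).modify tag PySem.Dict.empty
          (fun m => m.insert doc (m.getD doc 0 + 1))) h

-- third loop body for one searched tag t: for doc, c in hits[t].items():
-- score[doc] = score.get(doc, 0) + searched[t] * c
-- (hits[t] raises KeyError in Python when t is absent; excluded by Pre_solution)
def scoreTag (searched : PySem.Dict String Int) (hits : PySem.Dict String (PySem.Dict String Int))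
    (sc : PySem.Dict String Int) (t : String) : PySem.Dict String Int :=
  ((hits.getD t PySem.Dict.empty).items).foldl
    (fun sc p => sc.insert p.1 (sc.getD p.1 0 + searched.getD t 0 * p.2)) sc

def solution_alt (dataSource : List (List String)) (tags : List String) : List String :=
  let searched := searchedB tags
  let hits := dataSource.foldl hitsRow PySem.Dict.empty
  let score := searched.keys.foldl (scoreTag searched hits) PySem.Dict.empty
  (PySem.List.sorted (PySem.List.sorted score.keys (fun x => x) false)
      (fun d => -(score.getD d 0)) false).take 10

-- ===== PRECONDITION & SPEC =====
-- Pre_ excludes exactly the inputs where Python A raises: an empty row (IndexError on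
-- ds.pop(0)) or a searched tag occurring in no row's tail (KeyError on tags_in_docs[tag]).
def Pre_solution (dataSource : List (List String)) (tags : List String) : Prop :=
  (∀ r ∈ dataSource, r ≠ []) ∧ ∀ t ∈ tags, ∃ r ∈ dataSource, t ∈ r.tail
instance (dataSource : List (List String)) (tags : List String) :
    Decidable (Pre_solution dataSource tags) := by unfold Pre_solution; infer_instance

def pvWitness_solution : List (List String) × List String :=
  ([["d1", "a", "b"], ["d2", "a"]], ["a", "b", "a"])

def Spec_solution (dataSource : List (List String)) (tags : List String) (out : List String) : Prop := out = solution_alt dataSource tags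
instance (dataSource : List (List String)) (tags : List String) (out : List String) : Decidable (Spec_solution dataSource tags out) := by unfold Spec_solution; infer_instance

-- ===== CLAIM (what is proved, stated in full; the proofs are below) =====
def Claim_equal_solution : Prop := ∀ (dataSource : List (List String)) (tags : List String), Dom_solution dataSource tags → Pre_solution dataSource tags → Spec_solution dataSource tags (solution dataSource tags)

-- ===== LEMMAS AND PROOFS =====

-- the documents contributed to tags_in_docs[t] by one row
def occRow (t : String) (ds : List String) : List String :=
  match ds with
  | [] => []
  | doc :: rest => List.replicate (rest.count t) doc

-- all documents listed under tag t, in A's order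
def occ (dataSource : List (List String)) (t : String) : List String :=
  dataSource.flatMap (occRow t)

-- the total number of searched-tag hits of document doc
def Sn (dataSource : List (List String)) (tags : List String) (doc : String) : Nat :=
  (dataSource.map (fun ds =>
    match ds with
    | [] => 0
    | h :: rest => if h = doc then (rest.map (tags.count ·)).sum else 0)).sum

lemma guard_modify (d : PySem.Dict String (List String)) (k : String)
    (f : List String → List String) :
    (if d.contains k = true then d else d.insert k []).modify k [] f = d.modify k [] f := by
  by_cases h : d.contains k = true
  · simp [h]
  · have h' : d.contains k = false := by simpa using h
    simp [h, PySem.Dict.modify, PySem.Dict.getD_insert_self, PySem.Dict.insert_insert_self,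
      PySem.Dict.getD_of_not_contains d [] h']

lemma row_getD (rest : List String) (doc : String) (d : PySem.Dict String (List String))
    (c : String) :
    (rest.foldl (fun d tag =>
        let d' := if d.contains tag = true then d else d.insert tag []
        d'.modify tag [] (· ++ [doc])) d).getD c []
      = d.getD c [] ++ List.replicate (rest.count c) doc := by
  have hfun : (fun (d : PySem.Dict String (List String)) (tag : String) =>
      let d' := if d.contains tag = true then d else d.insert tag []
      d'.modify tag [] (· ++ [doc]))
      = fun d tag => d.modify tag [] (· ++ [doc]) := by
    funext d tag
    exact guard_modify d tag _
  rw [hfun]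
  have h2 : rest.foldl (fun d tag => d.modify tag [] (· ++ [doc])) d
      = (rest.map (fun t => (t, doc))).foldl (fun d p => d.modify p.1 [] (· ++ [p.2])) d := by
    rw [List.foldl_map]
  rw [h2, PySem.Dict.getD_foldl_modify_append]
  congr 1
  simp only [List.filter_map, List.map_map, Function.comp_def]
  rw [List.map_const', List.count_eq_length_filter]

lemma idx_getD (dataSource : List (List String)) (d : PySem.Dict String (List String))
    (c : String) :
    (dataSource.foldl rowIndexA d).getD c [] = d.getD c [] ++ occ dataSource c := by
  induction dataSource generalizing d with
  | nil => simp [occ]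
  | cons ds tl ih =>
    rw [List.foldl_cons, ih]
    cases ds with
    | nil => simp [rowIndexA, occ, occRow]
    | cons hdoc rest =>
      simp only [rowIndexA]
      rw [row_getD]
      simp [occ, occRow, List.flatMap_cons, List.append_assoc]

lemma foldl_nested_flatMap {α β σ : Type} (xs : List α) (L : α → List β)
    (g : σ → β → σ) (init : σ) :
    xs.foldl (fun st x => (L x).foldl g st) init = (xs.flatMap L).foldl g init := by
  induction xs generalizing init with
  | nil => rfl
  | cons x xs ih => simp [List.flatMap_cons, List.foldl_append, ih]

lemma foldl_stepA_fst (D : List String) (st : PySem.Set String × PySem.Dict String Int) :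
    (D.foldl stepA st).1 = PySem.Set.update st.1 D := by
  induction D generalizing st with
  | nil => simp [PySem.Set.update]
  | cons x D ih => simp [stepA, ih, PySem.Set.update, List.foldl_cons]

lemma stepA_contains (st : PySem.Set String × PySem.Dict String Int) (x doc : String) :
    (stepA st x).2.contains doc = (doc == x || st.2.contains doc) := by
  by_cases h : st.2.contains x = true
  · by_cases hdx : doc = x <;>
      simp [stepA, h, hdx, PySem.Dict.modify, PySem.Dict.contains_insert]
  · have h' : st.2.contains x = false := by simpa using h
    by_cases hdx : doc = x <;>
      simp [stepA, h', hdx, PySem.Dict.modify, PySem.Dict.contains_insert]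

lemma stepA_getD (st : PySem.Set String × PySem.Dict String Int) (x doc : String) :
    (stepA st x).2.getD doc 0
      = if doc = x then
          (if st.2.contains x = true then st.2.getD x 0 else 10 ^ 5) - 1
        else st.2.getD doc 0 := by
  by_cases hdx : doc = x
  · subst hdx
    by_cases h : st.2.contains doc = true
    · simp [stepA, h, PySem.Dict.modify, PySem.Dict.getD_insert_self]
    · have h' : st.2.contains doc = false := by simpa using h
      simp [stepA, h', PySem.Dict.modify, PySem.Dict.getD_insert_self]
  · by_cases h : st.2.contains x = true
    · simp [stepA, h, hdx, PySem.Dict.modify, PySem.Dict.getD_insert_of_ne _ _ _ hdx]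
    · have h' : st.2.contains x = false := by simpa using h
      simp [stepA, h', hdx, PySem.Dict.modify, PySem.Dict.getD_insert_of_ne _ _ _ hdx]

lemma foldl_stepA_getD (D : List String) (st : PySem.Set String × PySem.Dict String Int)
    (doc : String) :
    (D.foldl stepA st).2.getD doc 0 =
      if st.2.contains doc = true then st.2.getD doc 0 - D.count doc
      else if doc ∈ D then 10 ^ 5 - (D.count doc : Int) else 0 := by
  induction D generalizing st with
  | nil =>
    by_cases h : st.2.contains doc = true
    · simp [h]
    · have h' : st.2.contains doc = false := by simpa using h
      simp [h', PySem.Dict.getD_of_not_contains st.2 0 h']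
  | cons x D ih =>
    rw [List.foldl_cons, ih, stepA_contains, stepA_getD]
    by_cases hdx : doc = x
    · subst hdx
      by_cases hc : st.2.contains doc = true <;>
        · simp [hc]
          omega
    · have hne : (doc == x) = false := by simp [hdx]
      have hcnt : (x :: D).count doc = D.count doc := by
        simp [Ne.symm hdx]
      by_cases hc : st.2.contains doc = true <;>
        simp [hc, hne, hcnt, hdx, List.mem_cons]

lemma count_flatMap {α β : Type} [DecidableEq β] (l : List α) (f : α → List β) (b : β) :
    (l.flatMap f).count b = (l.map (fun x => (f x).count b)).sum := by
  induction l with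
  | nil => simp
  | cons a l ih => simp [List.flatMap_cons, List.count_append, ih]

lemma sum_map_swap {α β : Type} (l1 : List α) (l2 : List β) (f : α → β → Nat) :
    (l1.map (fun a => (l2.map (f a)).sum)).sum
      = (l2.map (fun b => (l1.map (fun a => f a b)).sum)).sum := by
  induction l1 with
  | nil => simp
  | cons a l1 ih => simp [List.sum_map_add, ih]

lemma sum_ite_count (tags : List String) (r : String) :
    (tags.map (fun t => if (r == t) = true then (1 : Nat) else 0)).sum = tags.count r := by
  induction tags with
  | nil => simp
  | cons t tags ih =>
    rw [List.map_cons, List.sum_cons, List.count_cons, ih]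
    by_cases h : r = t
    · subst h; simp; omega
    · have h1 : (r == t) = false := beq_eq_false_iff_ne.mpr h
      have h2 : (t == r) = false := beq_eq_false_iff_ne.mpr (Ne.symm h)
      rw [h1, h2]; simp

lemma count_swap (rest tags : List String) :
    (rest.map (tags.count ·)).sum = (tags.map (rest.count ·)).sum := by
  induction rest with
  | nil => simp
  | cons r rest ih =>
    have h1 : (tags.map ((r :: rest).count ·)).sum
        = (tags.map (rest.count ·)).sum
          + (tags.map (fun t => if (r == t) = true then 1 else 0)).sum := by
      simp only [List.count_cons]
      rw [← List.sum_map_add]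
    have h2 := sum_ite_count tags r
    simp only [List.map_cons, List.sum_cons, ih, h1, h2]
    omega

lemma D_count (dataSource : List (List String)) (tags : List String) (doc : String) :
    ((tags.flatMap (occ dataSource)).count doc) = Sn dataSource tags doc := by
  rw [count_flatMap]
  have h1 : ∀ t, (occ dataSource t).count doc
      = (dataSource.map (fun r => (occRow t r).count doc)).sum := by
    intro t; exact count_flatMap dataSource (occRow t) doc
  simp only [h1]
  rw [sum_map_swap]
  unfold Sn
  refine congrArg List.sum (List.map_congr_left ?_)
  intro r _
  cases r with
  | nil => simp [occRow]
  | cons h rest =>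
    by_cases hd : h = doc
    · subst hd
      simp [occRow, count_swap rest tags]
    · simp [occRow, List.count_replicate, hd]

lemma searched_getD (tags : List String) (t : String) :
    (searchedB tags).getD t 0 = (tags.count t : Int) := by
  unfold searchedB
  rw [PySem.Dict.getD_foldl_insert_add_one]
  simp [pysem]

lemma searchedB_eq_counter (tags : List String) :
    searchedB tags = PySem.Dict.counter tags := by
  unfold searchedB
  exact PySem.Dict.foldl_insert_getD_add_one_eq_counter tags

lemma hitsRow_inner_getD (doc t : String) (rest : List String)
    (h : PySem.Dict String (PySem.Dict String Int)) :
    (rest.foldl (fun h tag =>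
        (h.setdefault tag PySem.Dict.empty).modify tag PySem.Dict.empty
          (fun m => m.insert doc (m.getD doc 0 + 1))) h).getD t PySem.Dict.empty
      = (List.replicate (rest.count t) doc).foldl
          (fun m d => m.insert d (m.getD d 0 + 1)) (h.getD t PySem.Dict.empty) := by
  induction rest generalizing h with
  | nil => simp
  | cons tag rest ih =>
    rw [List.foldl_cons, ih]
    by_cases htag : tag = t
    · subst htag
      have hstep : ((h.setdefault tag PySem.Dict.empty).modify tag PySem.Dict.empty
          (fun m => m.insert doc (m.getD doc 0 + 1))).getD tag PySem.Dict.empty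
          = (h.getD tag PySem.Dict.empty).insert doc
              ((h.getD tag PySem.Dict.empty).getD doc 0 + 1) := by
        rw [PySem.Dict.getD_modify_self, PySem.Dict.getD_setdefault_self]
      rw [hstep, List.count_cons_self, List.replicate_succ, List.foldl_cons]
    · have hcnt : (tag :: rest).count t = rest.count t := by
        simp [htag]
      have hne : t ≠ tag := fun e => htag e.symm
      have hstep : ((h.setdefault tag PySem.Dict.empty).modify tag PySem.Dict.empty
          (fun m => m.insert doc (m.getD doc 0 + 1))).getD t PySem.Dict.empty
          = h.getD t PySem.Dict.empty := by
        rw [PySem.Dict.getD_modify_of_ne _ _ _ hne, PySem.Dict.getD_eq_get?_getD,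
          PySem.Dict.get?_setdefault_of_ne _ _ hne, ← PySem.Dict.getD_eq_get?_getD]
      rw [hstep, hcnt]

lemma hits_getD (dataSource : List (List String))
    (H : PySem.Dict String (PySem.Dict String Int)) (t : String) :
    (dataSource.foldl hitsRow H).getD t PySem.Dict.empty
      = (occ dataSource t).foldl (fun m d => m.insert d (m.getD d 0 + 1))
          (H.getD t PySem.Dict.empty) := by
  induction dataSource generalizing H with
  | nil => simp [occ]
  | cons ds tl ih =>
    rw [List.foldl_cons, ih]
    cases ds with
    | nil => simp [hitsRow, occ, occRow]
    | cons doc rest =>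
      simp only [hitsRow]
      rw [hitsRow_inner_getD]
      simp [occ, occRow, List.flatMap_cons, List.foldl_append]

lemma hits_getD_counter (dataSource : List (List String)) (t : String) :
    (dataSource.foldl hitsRow PySem.Dict.empty).getD t PySem.Dict.empty
      = PySem.Dict.counter (occ dataSource t) := by
  rw [hits_getD, PySem.Dict.getD_empty]
  exact PySem.Dict.foldl_insert_getD_add_one_eq_counter (occ dataSource t)

lemma score_inner_getD (searched : PySem.Dict String Int) (t : String)
    (l : List (String × Int)) (sc : PySem.Dict String Int) (doc : String) :
    (l.foldl (fun sc p => sc.insert p.1 (sc.getD p.1 0 + searched.getD t 0 * p.2)) sc).getD doc 0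
      = sc.getD doc 0
        + searched.getD t 0 * ((l.filter (fun p => p.1 == doc)).map (·.2)).sum := by
  induction l generalizing sc with
  | nil => simp
  | cons p l ih =>
    rw [List.foldl_cons, ih]
    by_cases hp : p.1 = doc
    · have hb : (p.1 == doc) = true := by simp [hp]
      rw [List.filter_cons, hb]
      simp only [if_true]
      rw [List.map_cons, List.sum_cons, ← hp, PySem.Dict.getD_insert_self]
      ring
    · have hb : (p.1 == doc) = false := by simp [hp]
      rw [List.filter_cons, hb]
      simp only [Bool.false_eq_true, if_false]
      rw [PySem.Dict.getD_insert_of_ne _ _ _ (fun e => hp e.symm)]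

lemma sum_filter_pairs (S : List String) (c : String → Int) (doc : String) (hnd : S.Nodup) :
    (((S.map (fun k => (k, c k))).filter (fun p => p.1 == doc)).map (·.2)).sum
      = if doc ∈ S then c doc else 0 := by
  induction S with
  | nil => simp
  | cons k S ih =>
    rcases List.nodup_cons.mp hnd with ⟨hk, hnd'⟩
    rw [List.map_cons, List.filter_cons]
    by_cases hkd : k = doc
    · subst hkd
      simp only [beq_self_eq_true, if_true]
      have hnil : (S.map (fun j => (j, c j))).filter (fun p => p.1 == k) = [] := by
        rw [List.filter_eq_nil_iff]
        intro p hp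
        obtain ⟨a, ha, rfl⟩ := List.mem_map.mp hp
        simp only [beq_iff_eq]
        exact fun e => hk (e ▸ ha)
      rw [hnil]
      simp
    · have hb : ((k, c k).1 == doc) = false := by simp [hkd]
      rw [hb]
      simp only [Bool.false_eq_true, if_false]
      rw [ih hnd']
      simp [List.mem_cons, (show doc ≠ k from fun e => hkd e.symm)]

lemma score_outer_getD (searched : PySem.Dict String Int)
    (hits : PySem.Dict String (PySem.Dict String Int)) (T : List String)
    (sc : PySem.Dict String Int) (doc : String) :
    (T.foldl (scoreTag searched hits) sc).getD doc 0
      = sc.getD doc 0 + (T.map (fun t => searched.getD t 0 *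
          ((((hits.getD t PySem.Dict.empty).items).filter (fun p => p.1 == doc)).map (·.2)).sum)).sum := by
  induction T generalizing sc with
  | nil => simp
  | cons t T ih =>
    rw [List.foldl_cons, ih]
    simp only [scoreTag]
    rw [score_inner_getD, List.map_cons, List.sum_cons]
    ring

lemma score_outer_keys (searched : PySem.Dict String Int)
    (hits : PySem.Dict String (PySem.Dict String Int)) (T : List String)
    (sc : PySem.Dict String Int) :
    (T.foldl (scoreTag searched hits) sc).keys
      = PySem.Set.update sc.keys
          (T.flatMap (fun t => ((hits.getD t PySem.Dict.empty).items).map Prod.fst)) := by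
  induction T generalizing sc with
  | nil => simp [PySem.Set.update]
  | cons t T ih =>
    rw [List.foldl_cons, ih, List.flatMap_cons, PySem.Set.update_append]
    congr 1
    simp only [scoreTag]
    rw [PySem.Dict.keys_foldl_insert_key (key := Prod.fst)
      (f := fun d p => d.getD p.1 0 + searched.getD t 0 * p.2)]

lemma dedup_weighted_sum (tags : List String) (g : String → Nat) :
    ((PySem.Set.ofList tags).map (fun t => tags.count t * g t)).sum = (tags.map g).sum := by
  have h1 := Finset.sum_list_map_count tags g
  have h2 : (PySem.Set.ofList tags).toFinset = tags.toFinset := by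
    ext a
    simp [List.mem_toFinset, PySem.Set.mem_ofList]
  have h3 := List.sum_toFinset (fun t => tags.count t * g t) (PySem.Set.nodup_ofList tags)
  rw [← h3, h2, h1]
  simp [smul_eq_mul]

lemma insertBy_congr {α : Type} (b1 b2 : α → α → Bool) (x : α) (ys : List α)
    (h : ∀ y ∈ ys, b1 x y = b2 x y) :
    PySem.List.insertBy b1 x ys = PySem.List.insertBy b2 x ys := by
  induction ys with
  | nil => rfl
  | cons y ys ih =>
    have hy := h y (by simp)
    simp only [PySem.List.insertBy, hy]
    split
    · rfl
    · rw [show PySem.List.insertBy b1 x ys = PySem.List.insertBy b2 x ys from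
        ih (fun z hz => h z (by simp [hz]))]

lemma foldl_insertBy_congr {α : Type} (b1 b2 : α → α → Bool) :
    ∀ (xs acc : List α), (∀ a ∈ xs, ∀ y ∈ acc, b1 a y = b2 a y) →
      (∀ a ∈ xs, ∀ a' ∈ xs, b1 a a' = b2 a a') →
      xs.foldl (fun acc x => PySem.List.insertBy b1 x acc) acc
        = xs.foldl (fun acc x => PySem.List.insertBy b2 x acc) acc := by
  intro xs
  induction xs with
  | nil => intro acc _ _; rfl
  | cons x xs ih =>
    intro acc hacc hxs
    rw [List.foldl_cons, List.foldl_cons]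
    rw [insertBy_congr b1 b2 x acc (hacc x (by simp))]
    apply ih
    · intro a ha y hy
      rcases (PySem.List.mem_insertBy b2 x y acc).mp hy with rfl | hy'
      · exact hxs a (by simp [ha]) y (by simp)
      · exact hacc a (by simp [ha]) y hy'
    · intro a ha a' ha'
      exact hxs a (by simp [ha]) a' (by simp [ha'])

lemma sorted_key_congr {α : Type} (xs : List α) (k1 k2 : α → Int)
    (h : ∀ a ∈ xs, ∀ b ∈ xs, decide (k1 a < k1 b) = decide (k2 a < k2 b)) :
    PySem.List.sorted xs k1 false = PySem.List.sorted xs k2 false := by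
  rw [PySem.List.sorted_eq_foldl_insertBy, PySem.List.sorted_eq_foldl_insertBy]
  exact foldl_insertBy_congr _ _ xs [] (by simp) h

lemma ports_eq (dataSource : List (List String)) (tags : List String) :
    solution dataSource tags = solution_alt dataSource tags := by
  simp only [solution, solution_alt]
  have hL : (fun t => (dataSource.foldl rowIndexA PySem.Dict.empty).getD t [])
      = occ dataSource := by
    funext t
    rw [idx_getD]
    simp [pysem]
  rw [foldl_nested_flatMap tags
    (fun tag => (dataSource.foldl rowIndexA PySem.Dict.empty).getD tag []) stepA
    (PySem.Set.empty, PySem.Dict.empty), hL]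
  set D := tags.flatMap (occ dataSource) with hD
  set searched := searchedB tags with hsearched
  set hits := dataSource.foldl hitsRow PySem.Dict.empty with hhits
  set score := searched.keys.foldl (scoreTag searched hits) PySem.Dict.empty with hscore
  have hTkeys : searched.keys = PySem.Set.ofList tags := by
    rw [hsearched, searchedB_eq_counter, PySem.Dict.keys_counter]
  have hitems : ∀ t, (hits.getD t PySem.Dict.empty).items
      = (PySem.Set.ofList (occ dataSource t)).map
          (fun k => (k, ((occ dataSource t).count k : Int))) := by
    intro t
    rw [hhits, hits_getD_counter, PySem.Dict.items_counter]
  have hkeysnd : score.keys.Nodup := by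
    rw [hscore, score_outer_keys]
    exact PySem.Set.nodup_update _ _ (by simp [pysem])
  have hsgetD : ∀ a, score.getD a 0 = (Sn dataSource tags a : Int) := by
    intro a
    rw [hscore, score_outer_getD, hTkeys]
    have hfun : (fun t => searched.getD t 0 *
        ((((hits.getD t PySem.Dict.empty).items).filter (fun p => p.1 == a)).map (·.2)).sum)
        = fun t => ((tags.count t * (occ dataSource t).count a : Nat) : Int) := by
      funext t
      rw [hitems t, sum_filter_pairs _ _ _ (PySem.Set.nodup_ofList _), hsearched,
        searched_getD]
      by_cases hmem : a ∈ PySem.Set.ofList (occ dataSource t)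
      · rw [if_pos hmem]
        push_cast
        ring
      · rw [if_neg hmem]
        have hz : (occ dataSource t).count a = 0 :=
          List.count_eq_zero.mpr (fun h => hmem ((PySem.Set.mem_ofList _ _).mpr h))
        simp [hz]
    rw [hfun]
    have hcast : ((PySem.Set.ofList tags).map
        (fun t => ((tags.count t * (occ dataSource t).count a : Nat) : Int))).sum
        = (((PySem.Set.ofList tags).map
            (fun t => tags.count t * (occ dataSource t).count a)).sum : Int) := by
      rw [Nat.cast_list_sum, List.map_map]
      simp [Function.comp_def]
    rw [hcast, dedup_weighted_sum tags (fun t => (occ dataSource t).count a),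
      ← count_flatMap tags (occ dataSource) a, D_count]
    simp [pysem]
  have hscont : ∀ a, score.contains a = decide (0 < Sn dataSource tags a) := by
    intro a
    rw [PySem.Dict.contains_eq_decide_mem_keys]
    apply decide_eq_decide.mpr
    rw [hscore, score_outer_keys, hTkeys]
    have hmap : ∀ t, ((hits.getD t PySem.Dict.empty).items).map Prod.fst
        = PySem.Set.ofList (occ dataSource t) := by
      intro t
      rw [hitems t, List.map_map]
      simp [Function.comp_def]
    constructor
    · intro h
      rcases (PySem.Set.mem_update _ _ _).mp h with h0 | h1
      · simp [pysem] at h0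
      · obtain ⟨t, ht, ha⟩ := List.mem_flatMap.mp h1
        rw [hmap t, PySem.Set.mem_ofList] at ha
        have haD : a ∈ D := by
          rw [hD]
          exact List.mem_flatMap.mpr ⟨t, (PySem.Set.mem_ofList _ _).mp ht, ha⟩
        rw [← D_count dataSource tags a, ← hD]
        exact List.count_pos_iff.mpr haD
    · intro h
      have haD : a ∈ D := by
        rw [hD]
        rw [← D_count dataSource tags a, ← hD] at h
        exact List.count_pos_iff.mp h
      obtain ⟨t, ht, ha⟩ := List.mem_flatMap.mp (hD ▸ haD)
      refine (PySem.Set.mem_update _ _ _).mpr (Or.inr (List.mem_flatMap.mpr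
        ⟨t, (PySem.Set.mem_ofList _ _).mpr ht, ?_⟩))
      rw [hmap t, PySem.Set.mem_ofList]
      exact ha
  have hmemD : ∀ a, a ∈ D ↔ 0 < Sn dataSource tags a := by
    intro a
    rw [← D_count dataSource tags a, ← hD]
    exact (List.count_pos_iff).symm
  have hfst : (D.foldl stepA (PySem.Set.empty, PySem.Dict.empty)).1 = PySem.Set.ofList D := by
    rw [foldl_stepA_fst]
    rfl
  have hperm : (PySem.Set.ofList D).Perm score.keys := by
    refine (List.perm_ext_iff_of_nodup (PySem.Set.nodup_ofList D) hkeysnd).mpr ?_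
    intro a
    rw [PySem.Set.mem_ofList, ← PySem.Dict.contains_iff_mem_keys, hscont, hmemD]
    simp
  have hinner : PySem.List.sorted (PySem.Set.ofList D) (fun x => x) false
      = PySem.List.sorted score.keys (fun x => x) false :=
    PySem.List.sorted_eq_sorted_of_perm _ _ _ (fun a b hab => hab) hperm
  rw [hfst, hinner]
  congr 1
  apply sorted_key_congr
  intro a ha b hb
  rw [PySem.List.mem_sorted] at ha hb
  rw [← PySem.Dict.contains_iff_mem_keys, hscont, decide_eq_true_iff] at ha hb
  have hcontA : ∀ c, ((PySem.Set.empty, (PySem.Dict.empty : PySem.Dict String Int)) :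
      PySem.Set String × PySem.Dict String Int).2.contains c = false := by
    simp [pysem]
  rw [foldl_stepA_getD, foldl_stepA_getD, hcontA, hcontA]
  simp only [Bool.false_eq_true, if_false]
  rw [if_pos ((hmemD a).mpr ha), if_pos ((hmemD b).mpr hb)]
  rw [hsgetD, hsgetD, D_count, D_count]
  apply decide_eq_decide.mpr
  omega

-- ===== VERDICT (by name: the statement is the Claim_ definition above) =====
theorem solution_spec : Claim_equal_solution := by
  intro dataSource tags _ _
  unfold Spec_solution
  exact ports_eq dataSource tags
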